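-- pv_equiv track=rewrite | github.com/jvasso/pretrain-rl-adaptive-learning | src/utils.py | extract_unique_keys
-- ===== SOURCE A (Python) =====
-- def extract_unique_keys(dict_list):
--     """
--     Extract keys that have different values or do not exist in all dictionaries within the list.
--
--     :param dict_list: List of dictionaries to analyze
--     :return: Set of unique keys
--     """
--     if not dict_list:  # If the list is empty, return an empty set
--         return set()
--
--     # Extract the keys of the first dictionary to start comparison
--     unique_keys = set(dict_list[0].keys())
--     common_keys = set(unique_keys)
--
--     # Compare with the rest of the dictionaries
--     for d in dict_list[1:]:
--         current_keys = set(d.keys())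
--         # Update unique keys with keys that are not in the current set of common keys
--         unique_keys.update(current_keys.symmetric_difference(common_keys))
--         # Update common keys with keys that are common in all dictionaries so far
--         common_keys.intersection_update(current_keys)
--
--     # Remove keys that are common to all dictionaries
--     unique_keys.difference_update(common_keys)
--
--     # Check for keys that are the same across dictionaries but have different values
--     for key in common_keys:
--         value_set = set(d.get(key, None) for d in dict_list)
--         if len(value_set) > 1:
--             unique_keys.add(key)
--
--     return unique_keys
-- ===== SOURCE B (Python) =====
-- def extract_unique_keys(dict_list):
--     """
--     Extract keys that have different values or do not exist in all dictionaries within the list.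
--
--     :param dict_list: List of dictionaries to analyze
--     :return: Set of unique keys
--     """
--     n = len(dict_list)
--     counts = {}
--     values = {}
--     for d in dict_list:
--         for key, v in d.items():
--             counts[key] = counts.get(key, 0) + 1
--             values.setdefault(key, []).append(v)
--     # keys missing from at least one dict
--     result = {key for key, c in counts.items() if c != n}
--     # universal keys whose values are not all equal
--     for key, c in counts.items():
--         if c == n and len(set(values[key])) > 1:
--             result.add(key)
--     return result
-- ===== Notes on version B (the rewrite author's own statement) =====
-- stated objective: simpler
-- what changed: A tracks unique/common key sets with per-dict symmetric differences and intersections and then rescans every dict per common key; B makes one pass building a key->count table and a key->values table, then decides each key by its count and (for universal keys only) the set of its collected values.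
import Mathlib
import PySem

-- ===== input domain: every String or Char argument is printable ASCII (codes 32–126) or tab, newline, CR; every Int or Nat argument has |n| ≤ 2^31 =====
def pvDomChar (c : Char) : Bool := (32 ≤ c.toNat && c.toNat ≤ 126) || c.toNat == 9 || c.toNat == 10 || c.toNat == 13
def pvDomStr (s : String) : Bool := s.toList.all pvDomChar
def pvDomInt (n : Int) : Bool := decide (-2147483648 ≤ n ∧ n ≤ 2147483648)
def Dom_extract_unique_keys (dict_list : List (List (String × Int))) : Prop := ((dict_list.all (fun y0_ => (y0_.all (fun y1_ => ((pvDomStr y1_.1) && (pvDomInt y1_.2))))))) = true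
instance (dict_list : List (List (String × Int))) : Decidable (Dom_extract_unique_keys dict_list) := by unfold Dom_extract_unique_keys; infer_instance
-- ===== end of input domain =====

-- B replaces A's per-pair set algebra (symmetric differences/intersections across dicts, then a
-- second value scan over all dicts for every common key) by one pass building a count table and a
-- value table, then one scan over the keys.  Equivalence is about the RETURN value (a Python set,
-- modelled as the insertion-ordered duplicate-free list both ports build).

-- ===== PORT A =====
def extract_unique_keys (dict_list : List (List (String × Int))) : List String :=
  match dict_list with
  | [] => PySem.Set.empty                                   -- if not dict_list: return set()
  | d0 :: rest =>
    -- unique_keys = set(dict_list[0].keys()); common_keys = set(unique_keys)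
    let uc0 : PySem.Set String := PySem.Set.ofList (PySem.Dict.keys (PySem.Dict.mk d0))
    -- for d in dict_list[1:]: unique_keys.update(cur ^ common); common &= cur
    let p := rest.foldl
      (fun (p : PySem.Set String × PySem.Set String) d =>
        let cur := PySem.Set.ofList (PySem.Dict.keys (PySem.Dict.mk d))
        (PySem.Set.update p.1 (PySem.Set.symmDiff cur p.2), PySem.Set.inter p.2 cur))
      (uc0, uc0)
    -- unique_keys.difference_update(common_keys)
    let unique := PySem.Set.diff p.1 p.2
    -- for key in common_keys: if len(set(d.get(key, None) for d in dict_list)) > 1: unique.add(key)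
    p.2.foldl
      (fun u key =>
        let value_set := PySem.Set.ofList ((d0 :: rest).map (fun d => PySem.Dict.get? (PySem.Dict.mk d) key))
        if PySem.Set.len value_set > 1 then PySem.Set.add u key else u)
      unique

-- ===== PORT B =====
def extract_unique_keys_alt (dict_list : List (List (String × Int))) : List String :=
  let n : Int := dict_list.length
  -- one pass: counts[key] = counts.get(key, 0) + 1; values.setdefault(key, []).append(v)
  let cv := dict_list.foldl
    (fun (p : PySem.Dict String Int × PySem.Dict String (List Int)) d =>
      (PySem.Dict.mk d).items.foldl
        (fun (p : PySem.Dict String Int × PySem.Dict String (List Int)) kv =>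
          (p.1.insert kv.1 (p.1.getD kv.1 0 + 1),
           p.2.modify kv.1 [] (fun l => l ++ [kv.2])))
        p)
    (PySem.Dict.empty, PySem.Dict.empty)
  let counts := cv.1
  let values := cv.2
  -- result = {key for key, c in counts.items() if c != n}
  let result := PySem.Set.ofList ((counts.items.filter (fun kv => kv.2 != n)).map (fun kv => kv.1))
  -- for key, c in counts.items(): if c == n and len(set(values[key])) > 1: result.add(key)
  -- (values[key] never raises: counts and values always hold the same keys; getD [] renders the lookup)
  counts.items.foldl
    (fun s kv =>
      if kv.2 == n && decide (PySem.Set.len (PySem.Set.ofList (values.getD kv.1 [])) > 1)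
      then PySem.Set.add s kv.1 else s)
    result

-- ===== PRECONDITION & SPEC =====
-- Pre_ excludes association lists in which one inner list repeats a key: those do not represent
-- Python dicts (a dict cannot hold a duplicate key), so no Python input maps to them.
def Pre_extract_unique_keys (dict_list : List (List (String × Int))) : Prop :=
  ∀ d ∈ dict_list, (d.map Prod.fst).Nodup
instance (dict_list : List (List (String × Int))) : Decidable (Pre_extract_unique_keys dict_list) := by
  unfold Pre_extract_unique_keys; infer_instance
def pvWitness_extract_unique_keys : (List (List (String × Int))) :=
  [[("a", 1), ("b", 2)], [("b", 3), ("c", 4)]]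
def Spec_extract_unique_keys (dict_list : List (List (String × Int))) (out : List String) : Prop := out = extract_unique_keys_alt dict_list
instance (dict_list : List (List (String × Int))) (out : List String) : Decidable (Spec_extract_unique_keys dict_list out) := by unfold Spec_extract_unique_keys; infer_instance

-- ===== CLAIM (what is proved, stated in full; the proofs are below) =====
def Claim_equal_extract_unique_keys : Prop := ∀ (dict_list : List (List (String × Int))), Dom_extract_unique_keys dict_list → Pre_extract_unique_keys dict_list → Spec_extract_unique_keys dict_list (extract_unique_keys dict_list)

-- ===== LEMMAS AND PROOFS =====

def euKeys (d : List (String × Int)) : List String := d.map Prod.fst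

theorem eu_foldl_flatMap {σ : Type} (f : σ → (String × Int) → σ) :
    ∀ (l : List (List (String × Int))) (init : σ),
      l.foldl (fun acc d => (PySem.Dict.mk d).items.foldl f acc) init = (l.flatMap id).foldl f init := by
  intro l
  induction l with
  | nil => intro init; rfl
  | cons d tl ih =>
    intro init
    simp only [List.foldl_cons, List.flatMap_cons, List.foldl_append, id]
    exact ih _

theorem eu_foldl_set_add_if (p : String → Bool) :
    ∀ (K s : List String), K.Nodup → (∀ k ∈ K, p k = true → k ∉ s) →
      K.foldl (fun s k => if p k then PySem.Set.add s k else s) s = s ++ K.filter p := by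
  intro K
  induction K with
  | nil => intro s _ _; simp
  | cons k K ih =>
    intro s hnd h
    rw [List.nodup_cons] at hnd
    rw [List.foldl_cons]
    by_cases hp : p k = true
    · have hks : k ∉ s := h k (List.mem_cons_self) hp
      have hadd : (if p k then PySem.Set.add s k else s) = s ++ [k] := by
        rw [if_pos hp]
        unfold PySem.Set.add
        rw [if_neg]
        intro hc
        exact hks ((PySem.Set.contains_iff s k).mp hc)
      have hfresh : ∀ x ∈ K, p x = true → x ∉ s ++ [k] := by
        intro x hx hpx hmem
        rcases List.mem_append.mp hmem with h1 | h2
        · exact h x (List.mem_cons_of_mem _ hx) hpx h1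
        · exact hnd.1 (List.mem_singleton.mp h2 ▸ hx)
      rw [hadd, ih (s ++ [k]) hnd.2 hfresh, List.filter_cons_of_pos hp]
      simp
    · rw [if_neg hp, ih s hnd.2 (fun x hx hpx => h x (List.mem_cons_of_mem _ hx) hpx),
        List.filter_cons_of_neg (by simpa using hp)]

theorem eu_update_symmDiff (u c : List String) (l : List String)
    (hsub : ∀ x ∈ c, x ∈ u) (hc : c.Nodup) :
    PySem.Set.update u (PySem.Set.symmDiff (PySem.Set.ofList l) c) = PySem.Set.update u l := by
  rw [PySem.Set.update_eq_append_filter, PySem.Set.update_eq_append_filter]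
  congr 1
  have hnd : (PySem.Set.symmDiff (PySem.Set.ofList l) c).Nodup :=
    PySem.Set.nodup_symmDiff _ _ (PySem.Set.nodup_ofList l) hc
  rw [PySem.Set.ofList_eq_self_of_nodup _ hnd]
  unfold PySem.Set.symmDiff
  rw [List.filter_append]
  have h2 : (PySem.Set.diff c (PySem.Set.ofList l)).filter (fun y => !PySem.Set.contains u y) = [] := by
    rw [List.filter_eq_nil_iff]
    intro a ha
    unfold PySem.Set.diff at ha
    have hac : a ∈ c := (List.mem_filter.mp ha).1
    simp [PySem.Set.contains, hsub a hac]
  have h1 : (PySem.Set.diff (PySem.Set.ofList l) c).filter (fun y => !PySem.Set.contains u y)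
      = (PySem.Set.ofList l).filter (fun y => !PySem.Set.contains u y) := by
    unfold PySem.Set.diff
    rw [List.filter_filter]
    apply List.filter_congr
    intro a _
    by_cases hau : a ∈ u
    · simp [PySem.Set.contains, hau]
    · have hac : a ∉ c := fun hc' => hau (hsub a hc')
      simp [PySem.Set.contains, hau, hac]
  rw [h1, h2, List.append_nil]

theorem eu_A_loop :
    ∀ (rest : List (List (String × Int))) (u c : List String),
      c.Nodup → (∀ x ∈ c, x ∈ u) →
      rest.foldl
        (fun (p : PySem.Set String × PySem.Set String) d =>
          let cur := PySem.Set.ofList (PySem.Dict.keys (PySem.Dict.mk d))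
          (PySem.Set.update p.1 (PySem.Set.symmDiff cur p.2), PySem.Set.inter p.2 cur))
        (u, c)
      = (PySem.Set.update u (rest.flatMap euKeys),
         c.filter (fun k => rest.all (fun d => decide (k ∈ euKeys d)))) := by
  intro rest
  induction rest with
  | nil =>
    intro u c _ _
    simp [PySem.Set.update, List.filter_true]
  | cons d tl ih =>
    intro u c hc hsub
    rw [List.foldl_cons]
    have hkeys : PySem.Dict.keys (PySem.Dict.mk d) = euKeys d := rfl
    have hnd' : (PySem.Set.inter c (PySem.Set.ofList (PySem.Dict.keys (PySem.Dict.mk d)))).Nodup :=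
      List.Nodup.filter _ hc
    have hsub' : ∀ x ∈ PySem.Set.inter c (PySem.Set.ofList (PySem.Dict.keys (PySem.Dict.mk d))),
        x ∈ PySem.Set.update u (PySem.Set.symmDiff (PySem.Set.ofList (PySem.Dict.keys (PySem.Dict.mk d))) c) := by
      intro x hx
      unfold PySem.Set.inter at hx
      have hxc : x ∈ c := (List.mem_filter.mp hx).1
      rw [PySem.Set.update_eq_append_filter]
      exact List.mem_append_left _ (hsub x hxc)
    rw [ih (PySem.Set.update u (PySem.Set.symmDiff (PySem.Set.ofList (PySem.Dict.keys (PySem.Dict.mk d))) c))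
      (PySem.Set.inter c (PySem.Set.ofList (PySem.Dict.keys (PySem.Dict.mk d)))) hnd' hsub']
    rw [hkeys, eu_update_symmDiff u c (euKeys d) hsub hc, ← PySem.Set.update_append,
      ← List.flatMap_cons]
    congr 1
    unfold PySem.Set.inter
    rw [List.filter_filter]
    apply List.filter_congr
    intro a _
    have hcon : PySem.Set.contains (PySem.Set.ofList (euKeys d)) a = decide (a ∈ euKeys d) := by
      rw [Bool.eq_iff_iff]
      simp only [PySem.Set.contains_iff, PySem.Set.mem_ofList, decide_eq_true_eq]
    rw [List.all_cons, hcon, Bool.and_comm]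

theorem eu_count_flat (dl : List (List (String × Int))) (k : String)
    (hpre : ∀ d ∈ dl, (euKeys d).Nodup) :
    (dl.flatMap euKeys).count k = dl.countP (fun d => decide (k ∈ euKeys d)) := by
  induction dl with
  | nil => rfl
  | cons d tl ih =>
    rw [List.flatMap_cons, List.count_append, List.countP_cons,
      ih (fun x hx => hpre x (List.mem_cons_of_mem _ hx))]
    by_cases hm : k ∈ euKeys d
    · rw [List.count_eq_one_of_mem (hpre d List.mem_cons_self) hm, if_pos (by simpa using hm)]
      omega
    · rw [List.count_eq_zero.mpr hm, if_neg (by simpa using hm)]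
      omega

theorem eu_filter_get (d : List (String × Int)) (k : String)
    (hnd : (euKeys d).Nodup) (hmem : k ∈ euKeys d) :
    ∃ v, d.filter (fun p => p.1 == k) = [(k, v)] ∧
         PySem.Dict.get? (PySem.Dict.mk d) k = some v := by
  induction d with
  | nil => simp [euKeys] at hmem
  | cons hd tl ih =>
    obtain ⟨k0, v0⟩ := hd
    unfold euKeys at hnd hmem
    rw [List.map_cons, List.nodup_cons] at hnd
    by_cases hk : k0 = k
    · subst hk
      refine ⟨v0, ?_, ?_⟩
      · rw [List.filter_cons_of_pos (by simp)]
        have : tl.filter (fun p => p.1 == k0) = [] := by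
          rw [List.filter_eq_nil_iff]
          intro p hp hbeq
          have hpk : p.1 = k0 := by simpa using hbeq
          have hgoal : p.1 ∈ tl.map Prod.fst := List.mem_map_of_mem (f := Prod.fst) hp
          rw [hpk] at hgoal
          exact hnd.1 hgoal
        rw [this]
      · simp [PySem.Dict.get?, List.find?]
    · have hmem' : k ∈ euKeys tl := by
        rcases List.mem_cons.mp hmem with h1 | h1
        · exact absurd h1.symm hk
        · exact h1
      obtain ⟨v, h1, h2⟩ := ih hnd.2 hmem'
      refine ⟨v, ?_, ?_⟩
      · rw [List.filter_cons_of_neg (by simpa using fun h => hk h), h1]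
      · rw [PySem.Dict.get?_mk_cons, if_neg (by simpa using hk)]
        exact h2

theorem eu_vals_eq (dl : List (List (String × Int))) (k : String)
    (hpre : ∀ d ∈ dl, (euKeys d).Nodup) (huniv : ∀ d ∈ dl, k ∈ euKeys d) :
    dl.map (fun d => PySem.Dict.get? (PySem.Dict.mk d) k)
      = (((dl.flatMap id).filter (fun p => p.1 == k)).map Prod.snd).map some := by
  induction dl with
  | nil => rfl
  | cons d tl ih =>
    obtain ⟨v, h1, h2⟩ := eu_filter_get d k (hpre d List.mem_cons_self) (huniv d List.mem_cons_self)
    rw [List.map_cons, List.flatMap_cons]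
    simp only [id_eq]
    rw [List.filter_append, h1, List.map_append, List.map_append, h2,
      ih (fun x hx => hpre x (List.mem_cons_of_mem _ hx)) (fun x hx => huniv x (List.mem_cons_of_mem _ hx))]
    simp

theorem eu_ofList_map_some (l : List Int) :
    PySem.Set.ofList (l.map some) = (PySem.Set.ofList l).map some := by
  induction l with
  | nil => rfl
  | cons x l ih =>
    rw [List.map_cons, PySem.Set.ofList_cons, PySem.Set.ofList_cons, ih]
    congr 1
    unfold PySem.Set.discard
    rw [List.filter_map]
    congr 1

def euFlat (dl : List (List (String × Int))) : List String := dl.flatMap euKeys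
def euK (dl : List (List (String × Int))) : List String := PySem.Set.ofList (euFlat dl)
def euC (d0 : List (String × Int)) (rest : List (List (String × Int))) : List String :=
  (PySem.Set.ofList (euKeys d0)).filter (fun k => rest.all (fun d => decide (k ∈ euKeys d)))
def euPA (dl : List (List (String × Int))) (k : String) : Bool :=
  decide (PySem.Set.len (PySem.Set.ofList (dl.map (fun d => PySem.Dict.get? (PySem.Dict.mk d) k))) > 1)
def euCnt (dl : List (List (String × Int))) (k : String) : Nat := (euFlat dl).count k
def euPB (dl : List (List (String × Int))) (k : String) : Bool :=
  decide (PySem.Set.len (PySem.Set.ofList (((dl.flatMap id).filter (fun p => p.1 == k)).map Prod.snd)) > 1)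

theorem eu_A_char (d0 : List (String × Int)) (rest : List (List (String × Int))) :
    extract_unique_keys (d0 :: rest) =
      (euK (d0 :: rest)).filter (fun x => !(PySem.Set.contains (euC d0 rest) x))
        ++ (euC d0 rest).filter (euPA (d0 :: rest)) := by
  have hkeys : ∀ d, PySem.Dict.keys (PySem.Dict.mk d) = euKeys d := fun _ => rfl
  have e1 := eu_A_loop rest (PySem.Set.ofList (PySem.Dict.keys (PySem.Dict.mk d0)))
    (PySem.Set.ofList (PySem.Dict.keys (PySem.Dict.mk d0))) (PySem.Set.nodup_ofList _) (fun x h => h)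
  have h0 : extract_unique_keys (d0 :: rest) =
      (rest.foldl
        (fun (p : PySem.Set String × PySem.Set String) d =>
          let cur := PySem.Set.ofList (PySem.Dict.keys (PySem.Dict.mk d))
          (PySem.Set.update p.1 (PySem.Set.symmDiff cur p.2), PySem.Set.inter p.2 cur))
        (PySem.Set.ofList (PySem.Dict.keys (PySem.Dict.mk d0)),
         PySem.Set.ofList (PySem.Dict.keys (PySem.Dict.mk d0)))).2.foldl
        (fun u key =>
          let value_set := PySem.Set.ofList ((d0 :: rest).map (fun d => PySem.Dict.get? (PySem.Dict.mk d) key))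
          if PySem.Set.len value_set > 1 then PySem.Set.add u key else u)
        (PySem.Set.diff
          (rest.foldl
            (fun (p : PySem.Set String × PySem.Set String) d =>
              let cur := PySem.Set.ofList (PySem.Dict.keys (PySem.Dict.mk d))
              (PySem.Set.update p.1 (PySem.Set.symmDiff cur p.2), PySem.Set.inter p.2 cur))
            (PySem.Set.ofList (PySem.Dict.keys (PySem.Dict.mk d0)),
             PySem.Set.ofList (PySem.Dict.keys (PySem.Dict.mk d0)))).1
          (rest.foldl
            (fun (p : PySem.Set String × PySem.Set String) d =>
              let cur := PySem.Set.ofList (PySem.Dict.keys (PySem.Dict.mk d))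
              (PySem.Set.update p.1 (PySem.Set.symmDiff cur p.2), PySem.Set.inter p.2 cur))
            (PySem.Set.ofList (PySem.Dict.keys (PySem.Dict.mk d0)),
             PySem.Set.ofList (PySem.Dict.keys (PySem.Dict.mk d0)))).2) := rfl
  rw [h0, e1]
  have hC : (PySem.Set.ofList (PySem.Dict.keys (PySem.Dict.mk d0))).filter
      (fun k => rest.all (fun d => decide (k ∈ euKeys d))) = euC d0 rest := by
    rw [hkeys]; rfl
  have hKup : PySem.Set.update (PySem.Set.ofList (PySem.Dict.keys (PySem.Dict.mk d0)))
      (rest.flatMap euKeys) = euK (d0 :: rest) := by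
    rw [hkeys]
    unfold euK euFlat
    rw [List.flatMap_cons, PySem.Set.ofList_append]
  rw [hC, hKup]
  have hfun : (fun (u : List String) key =>
        let value_set := PySem.Set.ofList ((d0 :: rest).map (fun d => PySem.Dict.get? (PySem.Dict.mk d) key))
        if PySem.Set.len value_set > 1 then PySem.Set.add u key else u)
      = (fun s k => if euPA (d0 :: rest) k then PySem.Set.add s k else s) := by
    funext u key
    simp only [euPA, decide_eq_true_eq]
  rw [hfun]
  have hCnd : (euC d0 rest).Nodup := List.Nodup.filter _ (PySem.Set.nodup_ofList _)
  have hfresh : ∀ k ∈ euC d0 rest, euPA (d0 :: rest) k = true →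
      k ∉ PySem.Set.diff (euK (d0 :: rest)) (euC d0 rest) := by
    intro k hk _ hmem
    unfold PySem.Set.diff at hmem
    have h2 := (List.mem_filter.mp hmem).2
    rw [(PySem.Set.contains_iff _ _).mpr hk] at h2
    simp at h2
  rw [eu_foldl_set_add_if (euPA (d0 :: rest)) (euC d0 rest) _ hCnd hfresh]
  rfl

theorem eu_B_char (dl : List (List (String × Int))) :
    extract_unique_keys_alt dl =
      (euK dl).filter (fun k => decide (euCnt dl k ≠ dl.length))
        ++ (euK dl).filter (fun k => decide (euCnt dl k = dl.length) && euPB dl k) := by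
  have hflat := eu_foldl_flatMap
    (fun (p : PySem.Dict String Int × PySem.Dict String (List Int)) kv =>
      (p.1.insert kv.1 (p.1.getD kv.1 0 + 1), p.2.modify kv.1 [] (fun l => l ++ [kv.2]))) dl
    (PySem.Dict.empty, PySem.Dict.empty)
  have hsplit : (dl.flatMap id).foldl
      (fun (p : PySem.Dict String Int × PySem.Dict String (List Int)) kv =>
        (p.1.insert kv.1 (p.1.getD kv.1 0 + 1), p.2.modify kv.1 [] (fun l => l ++ [kv.2])))
      (PySem.Dict.empty, PySem.Dict.empty)
      = ((dl.flatMap id).foldl (fun (d : PySem.Dict String Int) (kv : String × Int) => d.insert kv.1 (d.getD kv.1 0 + 1)) PySem.Dict.empty,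
         (dl.flatMap id).foldl (fun (d : PySem.Dict String (List Int)) (kv : String × Int) => d.modify kv.1 [] (fun l => l ++ [kv.2])) PySem.Dict.empty) :=
    PySem.List.foldl_prod_mk
      (fun (d : PySem.Dict String Int) (kv : String × Int) => d.insert kv.1 (d.getD kv.1 0 + 1))
      (fun (d : PySem.Dict String (List Int)) (kv : String × Int) => d.modify kv.1 [] (fun l => l ++ [kv.2]))
      (dl.flatMap id) PySem.Dict.empty PySem.Dict.empty
  have hfst : (dl.flatMap id).map Prod.fst = euFlat dl := by
    rw [List.map_flatMap]
    unfold euFlat euKeys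
    simp
  have hm : (dl.flatMap id).foldl (fun (d : PySem.Dict String Int) (kv : String × Int) => d.insert kv.1 (d.getD kv.1 0 + 1)) PySem.Dict.empty
      = ((dl.flatMap id).map Prod.fst).foldl (fun (d : PySem.Dict String Int) (x : String) => d.insert x (d.getD x 0 + 1)) PySem.Dict.empty :=
    (List.foldl_map (f := Prod.fst)
      (g := fun (d : PySem.Dict String Int) (x : String) => d.insert x (d.getD x 0 + 1))
      (l := dl.flatMap id) (init := PySem.Dict.empty)).symm
  have hgetD : ∀ k, ((dl.flatMap id).foldl (fun (d : PySem.Dict String Int) (kv : String × Int) => d.insert kv.1 (d.getD kv.1 0 + 1))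
      PySem.Dict.empty).getD k 0 = ((euCnt dl k : Int)) := by
    intro k
    rw [hm, PySem.Dict.getD_foldl_insert_add_one, hfst]
    unfold euCnt
    simp
  have hknd : ((dl.flatMap id).foldl (fun (d : PySem.Dict String Int) (kv : String × Int) => d.insert kv.1 (d.getD kv.1 0 + 1))
      PySem.Dict.empty).keys.Nodup := by
    rw [hm]
    exact PySem.Dict.nodup_keys_foldl_insert _ _ _ PySem.Dict.nodup_keys_empty
  have hkeys : ((dl.flatMap id).foldl (fun (d : PySem.Dict String Int) (kv : String × Int) => d.insert kv.1 (d.getD kv.1 0 + 1))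
      PySem.Dict.empty).keys = euK dl := by
    rw [hm, PySem.Dict.keys_foldl_insert, hfst]
    show PySem.Set.update [] (euFlat dl) = euK dl
    rw [PySem.Set.update_nil_left]
    rfl
  have hitems : ((dl.flatMap id).foldl (fun (d : PySem.Dict String Int) (kv : String × Int) => d.insert kv.1 (d.getD kv.1 0 + 1))
      PySem.Dict.empty).items = (euK dl).map (fun k => (k, (euCnt dl k : Int))) := by
    rw [PySem.Dict.items_eq_map_keys _ hknd 0, hkeys]
    apply List.map_congr_left
    intro k _
    rw [hgetD k]
  have hvals : ∀ k, ((dl.flatMap id).foldl (fun (d : PySem.Dict String (List Int)) (kv : String × Int) => d.modify kv.1 [] (fun l => l ++ [kv.2]))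
      PySem.Dict.empty).getD k [] = ((dl.flatMap id).filter (fun p => p.1 == k)).map Prod.snd := by
    intro k
    rw [PySem.Dict.getD_foldl_modify_append]
    simp
  have hbeq : ∀ a b : Nat, (((a : Int)) == ((b : Int))) = decide (a = b) := by
    intro a b
    rw [Bool.eq_iff_iff]
    simp
  have hbne : ∀ a b : Nat, (((a : Int)) != ((b : Int))) = decide (a ≠ b) := by
    intro a b
    rw [Bool.eq_iff_iff]
    simp
  rw [show extract_unique_keys_alt dl =
    ((dl.foldl
      (fun (p : PySem.Dict String Int × PySem.Dict String (List Int)) d =>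
        (PySem.Dict.mk d).items.foldl
          (fun (p : PySem.Dict String Int × PySem.Dict String (List Int)) kv =>
            (p.1.insert kv.1 (p.1.getD kv.1 0 + 1),
             p.2.modify kv.1 [] (fun l => l ++ [kv.2])))
          p)
      (PySem.Dict.empty, PySem.Dict.empty)).1.items.foldl
      (fun s kv =>
        if kv.2 == (dl.length : Int) && decide (PySem.Set.len (PySem.Set.ofList
            ((dl.foldl
              (fun (p : PySem.Dict String Int × PySem.Dict String (List Int)) d =>
                (PySem.Dict.mk d).items.foldl
                  (fun (p : PySem.Dict String Int × PySem.Dict String (List Int)) kv =>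
                    (p.1.insert kv.1 (p.1.getD kv.1 0 + 1),
                     p.2.modify kv.1 [] (fun l => l ++ [kv.2])))
                  p)
              (PySem.Dict.empty, PySem.Dict.empty)).2.getD kv.1 [])) > 1)
        then PySem.Set.add s kv.1 else s)
      (PySem.Set.ofList
        (((dl.foldl
          (fun (p : PySem.Dict String Int × PySem.Dict String (List Int)) d =>
            (PySem.Dict.mk d).items.foldl
              (fun (p : PySem.Dict String Int × PySem.Dict String (List Int)) kv =>
                (p.1.insert kv.1 (p.1.getD kv.1 0 + 1),
                 p.2.modify kv.1 [] (fun l => l ++ [kv.2])))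
              p)
          (PySem.Dict.empty, PySem.Dict.empty)).1.items.filter
            (fun kv => kv.2 != (dl.length : Int))).map (fun kv => kv.1)))) from rfl]
  rw [hflat, hsplit]
  dsimp only
  rw [hitems]
  have hresult : PySem.Set.ofList
      (((((euK dl).map (fun k => (k, (euCnt dl k : Int)))).filter
        (fun kv => kv.2 != (dl.length : Int))).map (fun kv => kv.1)))
      = (euK dl).filter (fun k => decide (euCnt dl k ≠ dl.length)) := by
    rw [List.filter_map, List.map_map]
    have h1 : ((fun (kv : String × Int) => kv.1) ∘ (fun k => (k, (euCnt dl k : Int))))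
        = fun (k : String) => k := rfl
    have h2 : ((fun (kv : String × Int) => kv.2 != (dl.length : Int)) ∘ (fun k => (k, (euCnt dl k : Int))))
        = fun k => decide (euCnt dl k ≠ dl.length) := by
      funext k
      exact hbne _ _
    rw [h1, h2, List.map_id']
    exact PySem.Set.ofList_eq_self_of_nodup _ (List.Nodup.filter _ (PySem.Set.nodup_ofList _))
  rw [hresult]
  have hfm : ∀ (s0 : List String),
      ((euK dl).map (fun k => (k, (euCnt dl k : Int)))).foldl
        (fun s kv =>
          if kv.2 == (dl.length : Int) && decide (PySem.Set.len (PySem.Set.ofList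
              (((dl.flatMap id).foldl (fun (d : PySem.Dict String (List Int)) (kv : String × Int) => d.modify kv.1 [] (fun l => l ++ [kv.2]))
                PySem.Dict.empty).getD kv.1 [])) > 1)
          then PySem.Set.add s kv.1 else s) s0
      = (euK dl).foldl
        (fun s k =>
          if decide (euCnt dl k = dl.length) && euPB dl k
          then PySem.Set.add s k else s) s0 := by
    intro s0
    rw [List.foldl_map]
    congr 1
    funext s k
    dsimp only
    rw [hvals k, hbeq (euCnt dl k) dl.length]
    unfold euPB
    rfl
  have hfresh : ∀ k ∈ euK dl, (decide (euCnt dl k = dl.length) && euPB dl k) = true →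
      k ∉ (euK dl).filter (fun k => decide (euCnt dl k ≠ dl.length)) := by
    intro k _ hq hmem
    have h1 := (List.mem_filter.mp hmem).2
    simp only [decide_eq_true_eq] at h1
    simp at hq
    exact h1 hq.1
  rw [hfm]
  exact eu_foldl_set_add_if _ (euK dl) _
    (show (euK dl).Nodup from PySem.Set.nodup_ofList _) hfresh


theorem eu_univ_iff (d0 : List (String × Int)) (rest : List (List (String × Int)))
    (hpre : ∀ d ∈ d0 :: rest, (euKeys d).Nodup) (k : String) :
    euCnt (d0 :: rest) k = (d0 :: rest).length ↔ ∀ d ∈ d0 :: rest, k ∈ euKeys d := by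
  unfold euCnt euFlat
  rw [eu_count_flat _ _ hpre, List.countP_eq_length]
  simp

theorem eu_c_mem_iff (d0 : List (String × Int)) (rest : List (List (String × Int))) (k : String) :
    k ∈ euC d0 rest ↔ ∀ d ∈ d0 :: rest, k ∈ euKeys d := by
  unfold euC
  rw [List.mem_filter, PySem.Set.mem_ofList, List.forall_mem_cons]
  simp

theorem eu_main (d0 : List (String × Int)) (rest : List (List (String × Int)))
    (hpre : ∀ d ∈ d0 :: rest, (euKeys d).Nodup) :
    extract_unique_keys (d0 :: rest) = extract_unique_keys_alt (d0 :: rest) := by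
  rw [eu_A_char d0 rest, eu_B_char (d0 :: rest)]
  have hblock1 : (euK (d0 :: rest)).filter (fun x => !(PySem.Set.contains (euC d0 rest) x))
      = (euK (d0 :: rest)).filter (fun k => decide (euCnt (d0 :: rest) k ≠ (d0 :: rest).length)) := by
    apply List.filter_congr
    intro k _
    rw [Bool.eq_iff_iff]
    simp only [Bool.not_eq_eq_eq_not, Bool.not_true, decide_eq_true_eq]
    rw [← Bool.not_eq_true, PySem.Set.contains_iff, eu_c_mem_iff]
    simp only [ne_eq]
    rw [eu_univ_iff d0 rest hpre]
  have hCeq : (euK (d0 :: rest)).filter (fun k => decide (euCnt (d0 :: rest) k = (d0 :: rest).length))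
      = euC d0 rest := by
    have hK : euK (d0 :: rest)
        = PySem.Set.ofList (euKeys d0) ++
          (PySem.Set.ofList (rest.flatMap euKeys)).filter
            (fun y => !PySem.Set.contains (PySem.Set.ofList (euKeys d0)) y) := by
      unfold euK euFlat
      rw [List.flatMap_cons, PySem.Set.ofList_append, PySem.Set.update_eq_append_filter]
    rw [hK, List.filter_append]
    have hnil : ((PySem.Set.ofList (rest.flatMap euKeys)).filter
        (fun y => !PySem.Set.contains (PySem.Set.ofList (euKeys d0)) y)).filter
        (fun k => decide (euCnt (d0 :: rest) k = (d0 :: rest).length)) = [] := by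
      rw [List.filter_eq_nil_iff]
      intro a ha
      have h1 := (List.mem_filter.mp ha).2
      have hnot : a ∉ euKeys d0 := by
        intro hmem
        rw [Bool.not_eq_eq_eq_not, Bool.not_true] at h1
        have := (PySem.Set.contains_iff _ _).mpr ((PySem.Set.mem_ofList _ _).mpr hmem)
        rw [this] at h1
        cases h1
      simp only [decide_eq_true_eq]
      intro heq
      exact hnot (((eu_univ_iff d0 rest hpre a).mp heq) d0 List.mem_cons_self)
    have hfirst : (PySem.Set.ofList (euKeys d0)).filter
        (fun k => decide (euCnt (d0 :: rest) k = (d0 :: rest).length)) = euC d0 rest := by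
      unfold euC
      apply List.filter_congr
      intro k hk
      have hk0 : k ∈ euKeys d0 := (PySem.Set.mem_ofList _ _).mp hk
      rw [Bool.eq_iff_iff]
      simp only [decide_eq_true_eq, List.all_eq_true]
      rw [eu_univ_iff d0 rest hpre, List.forall_mem_cons]
      simp [hk0]
    rw [hnil, hfirst, List.append_nil]
  have hblock2 : (euK (d0 :: rest)).filter
        (fun k => decide (euCnt (d0 :: rest) k = (d0 :: rest).length) && euPB (d0 :: rest) k)
      = (euC d0 rest).filter (euPA (d0 :: rest)) := by
    have hsplit : (euK (d0 :: rest)).filter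
          (fun k => decide (euCnt (d0 :: rest) k = (d0 :: rest).length) && euPB (d0 :: rest) k)
        = ((euK (d0 :: rest)).filter
            (fun k => decide (euCnt (d0 :: rest) k = (d0 :: rest).length))).filter (euPB (d0 :: rest)) := by
      rw [List.filter_filter]
      apply List.filter_congr
      intro a _
      rw [Bool.and_comm]
    rw [hsplit, hCeq]
    apply List.filter_congr
    intro k hk
    have huniv : ∀ d ∈ d0 :: rest, k ∈ euKeys d := (eu_c_mem_iff d0 rest k).mp hk
    have hv := eu_vals_eq (d0 :: rest) k hpre huniv
    unfold euPB euPA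
    rw [hv, eu_ofList_map_some]
    unfold PySem.Set.len
    rw [List.length_map]
  rw [hblock1, hblock2]

theorem extract_unique_keys_spec : Claim_equal_extract_unique_keys := by
  intro dict_list _hdom hpre
  show extract_unique_keys dict_list = extract_unique_keys_alt dict_list
  cases dict_list with
  | nil => rfl
  | cons d0 rest => exact eu_main d0 rest hpre
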